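-- pv_equiv track=rewrite | github.com/AgborEmmanuel/GROUP10-CEF440 | GROUP 10 . CarDocAI/backend/services/audio_analyzer.py | _determine_urgency_level
-- ===== SOURCE A (Python) =====
-- from typing import Dict, Any, List, Tuple
--
-- def _determine_urgency_level(detected_faults: List[Dict]) -> str:
--     """Determine urgency level based on detected faults"""
--     if not detected_faults:
--         return "normal"
--
--     # Check for critical faults
--     for fault in detected_faults:
--         if fault.get('urgency') == 'critical':
--             return "critical"
--
--     # Check for warning faults
--     for fault in detected_faults:
--         if fault.get('urgency') == 'warning':
--             return "warning"
--
--     return "normal"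
-- ===== SOURCE B (Python) =====
-- from typing import Dict, Any, List, Tuple
--
-- _RANK = {'critical': 2, 'warning': 1}
-- _LEVELS = ('normal', 'warning', 'critical')
--
-- def _determine_urgency_level(detected_faults: List[Dict]) -> str:
--     """Determine urgency level based on detected faults"""
--     level = 0
--     for fault in detected_faults:
--         level = max(level, _RANK.get(fault.get('urgency'), 0))
--     return _LEVELS[level]
-- ===== Notes on version B (the rewrite author's own statement) =====
-- stated objective: alternative
-- what changed: Replaces A's empty-check plus two short-circuiting priority scans with a single pass that folds each fault's urgency to a numeric severity rank with a running max, then decodes the maximum rank to its level name.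
import Mathlib
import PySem

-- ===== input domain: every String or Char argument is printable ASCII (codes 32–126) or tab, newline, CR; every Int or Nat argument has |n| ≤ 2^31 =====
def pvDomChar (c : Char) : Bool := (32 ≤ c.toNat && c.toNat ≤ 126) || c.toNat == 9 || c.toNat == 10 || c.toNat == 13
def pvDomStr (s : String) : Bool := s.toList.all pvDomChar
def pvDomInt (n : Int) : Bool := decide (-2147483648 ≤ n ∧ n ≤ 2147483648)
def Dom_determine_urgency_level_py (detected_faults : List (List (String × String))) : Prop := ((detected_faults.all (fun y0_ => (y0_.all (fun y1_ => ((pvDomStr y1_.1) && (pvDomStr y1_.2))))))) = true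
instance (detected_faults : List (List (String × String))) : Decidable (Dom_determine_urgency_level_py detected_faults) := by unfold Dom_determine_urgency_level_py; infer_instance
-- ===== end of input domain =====

-- B replaces A's empty-check plus two short-circuiting priority scans by one fold
-- computing the maximum numeric severity rank, decoded to a name (objective: alternative).

-- fault.get('urgency'): first-match lookup in the association list (shared dict semantics)
def pvGetUrgency (f : List (String × String)) : Option String :=
  (f.find? (fun p => p.1 == "urgency")).map (·.2)

-- ===== PORT A =====
def determine_urgency_level_py (detected_faults : List (List (String × String))) : String :=
  if detected_faults = [] then "normal"
  else if detected_faults.any (fun f => pvGetUrgency f == some "critical") then "critical"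
  else if detected_faults.any (fun f => pvGetUrgency f == some "warning") then "warning"
  else "normal"

-- ===== PORT B =====
-- _RANK.get(fault.get('urgency'), 0): the two-entry dict lookup with default 0
def pvRank (f : List (String × String)) : Nat :=
  match pvGetUrgency f with
  | some "critical" => 2
  | some "warning" => 1
  | _ => 0

def determine_urgency_level_py_alt (detected_faults : List (List (String × String))) : String :=
  let level := detected_faults.foldl (fun acc f => max acc (pvRank f)) 0
  -- _LEVELS[level]: level is always ≤ 2, so the tuple index never raises
  ["normal", "warning", "critical"].getD level "normal"

-- ===== PRECONDITION & SPEC =====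
def Spec_determine_urgency_level_py (detected_faults : List (List (String × String))) (out : String) : Prop := out = determine_urgency_level_py_alt detected_faults
instance (detected_faults : List (List (String × String))) (out : String) : Decidable (Spec_determine_urgency_level_py detected_faults out) := by unfold Spec_determine_urgency_level_py; infer_instance

-- ===== CLAIM (what is proved, stated in full; the proofs are below) =====
def Claim_equal_determine_urgency_level_py : Prop := ∀ (detected_faults : List (List (String × String))), Dom_determine_urgency_level_py detected_faults → Spec_determine_urgency_level_py detected_faults (determine_urgency_level_py detected_faults)

-- ===== LEMMAS AND PROOFS =====

-- pull the accumulator out of B's running-max fold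
theorem pv_foldl_max (l : List (List (String × String))) (a : Nat) :
    l.foldl (fun acc f => max acc (pvRank f)) a
      = max a (l.foldl (fun acc f => max acc (pvRank f)) 0) := by
  induction l generalizing a with
  | nil => simp
  | cons h t ih =>
    simp only [List.foldl_cons]
    rw [ih (max a (pvRank h)), ih (max 0 (pvRank h))]
    omega

-- characterise B's maximum rank by A's two existence tests
theorem pv_max_rank_eq (l : List (List (String × String))) :
    l.foldl (fun acc f => max acc (pvRank f)) 0
      = (if l.any (fun f => pvGetUrgency f == some "critical") then 2
         else if l.any (fun f => pvGetUrgency f == some "warning") then 1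
         else 0) := by
  induction l with
  | nil => simp
  | cons h t ih =>
    simp only [List.foldl_cons, List.any_cons]
    rw [pv_foldl_max, ih]
    have hr : pvRank h = (if pvGetUrgency h == some "critical" then 2
        else if pvGetUrgency h == some "warning" then 1 else 0) := by
      unfold pvRank
      rcases hu : pvGetUrgency h with _ | s
      · simp
      · by_cases hc : s = "critical"
        · simp [hc]
        · by_cases hw : s = "warning"
          · simp [hw]
          · simp only [Option.some.injEq, beq_iff_eq]
            rw [if_neg hc, if_neg hw]
            split <;> simp_all
    rw [hr]
    by_cases hc : (pvGetUrgency h == some "critical") = true <;>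
      by_cases hw : (pvGetUrgency h == some "warning") = true <;>
        simp [hc, hw] <;> split_ifs <;> omega

-- ===== VERDICT (by name: the statement is the Claim_ definition above) =====
theorem determine_urgency_level_py_spec : Claim_equal_determine_urgency_level_py := by
  intro dfs _
  unfold Spec_determine_urgency_level_py determine_urgency_level_py determine_urgency_level_py_alt
  simp only [pv_max_rank_eq]
  rcases dfs with _ | ⟨h, t⟩
  · rfl
  · by_cases hc : (List.any (h :: t) fun f => pvGetUrgency f == some "critical") = true <;>
      by_cases hw : (List.any (h :: t) fun f => pvGetUrgency f == some "warning") = true <;>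
        simp [hc, hw]
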